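-- pv_equiv track=rewrite | github.com/med-emerging-math/contemporary-emerging-math | Voting_methods.py | elimination
-- ===== SOURCE A (Python) =====
-- def elimination(candidate, election):
--     """Return the election with candidate removed."""
--     new_election = {}
--     for ballot in election.keys():
--         new_ballot = ''.join([x for x in ballot if x != candidate])
--         if not new_ballot in new_election.keys():
--             new_election[new_ballot] = election[ballot]
--         else:
--             new_election[new_ballot] += election[ballot]
--     return new_election
-- ===== SOURCE B (Python) =====
-- def elimination(candidate, election):
--     """Return the election with candidate removed."""
--     stripped = [(''.join(c for c in ballot if c != candidate), votes)
--                 for ballot, votes in election.items()]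
--     order = dict.fromkeys(b for b, _ in stripped)
--     return {b: sum(v for bb, v in stripped if bb == b) for b in order}
-- ===== Notes on version B (the rewrite author's own statement) =====
-- stated objective: alternative
-- what changed: B builds the stripped-ballot/votes list once, dedups the stripped ballots in first-occurrence order with dict.fromkeys, and computes each total as an independent per-key sum over that list, instead of A's single-pass dict accumulation with a membership branch and +=.
import Mathlib
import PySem

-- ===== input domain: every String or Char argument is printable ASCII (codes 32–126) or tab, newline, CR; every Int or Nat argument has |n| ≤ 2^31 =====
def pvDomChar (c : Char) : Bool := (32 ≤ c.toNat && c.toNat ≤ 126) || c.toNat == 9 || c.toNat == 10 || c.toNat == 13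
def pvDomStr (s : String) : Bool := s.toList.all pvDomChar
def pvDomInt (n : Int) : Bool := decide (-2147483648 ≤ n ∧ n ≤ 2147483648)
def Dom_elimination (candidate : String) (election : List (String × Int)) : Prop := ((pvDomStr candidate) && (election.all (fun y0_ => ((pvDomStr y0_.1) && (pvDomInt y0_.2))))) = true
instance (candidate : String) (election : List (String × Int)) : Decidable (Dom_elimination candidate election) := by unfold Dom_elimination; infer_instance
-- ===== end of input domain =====

-- B replaces A's single-pass dict accumulation by dedup-then-per-key-sum (same cost class, different decomposition).

-- ===== PORT A =====
-- ''.join([x for x in ballot if x != candidate])  (x ranges over 1-char strings)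
def stripCand (candidate : String) (ballot : String) : String :=
  String.mk (ballot.toList.filter (fun c => String.mk [c] != candidate))

def elimination (candidate : String) (election : List (String × Int)) : List (String × Int) :=
  (election.foldl
      (fun d p =>
        let nb := stripCand candidate p.1
        if d.contains nb then d.modify nb 0 (· + p.2) else d.insert nb p.2)
      PySem.Dict.empty).items

-- ===== PORT B =====
def elimination_alt (candidate : String) (election : List (String × Int)) : List (String × Int) :=
  let stripped := election.map (fun p => (stripCand candidate p.1, p.2))
  let order : List String := PySem.Set.ofList (stripped.map (·.1))
  order.map (fun b => (b, ((stripped.filter (fun q => q.1 == b)).map (·.2)).sum))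

-- ===== PRECONDITION & SPEC =====
-- Pre_ excludes association lists with duplicate ballot keys: they do not represent a single
-- Python dict (dict construction keeps only the last value per key), so both ports read an
-- input the Python functions never receive.
def Pre_elimination (candidate : String) (election : List (String × Int)) : Prop :=
  (election.map Prod.fst).Nodup
instance (candidate : String) (election : List (String × Int)) : Decidable (Pre_elimination candidate election) := by unfold Pre_elimination; infer_instance

def pvWitness_elimination : String × (List (String × Int)) := ("b", [("ab", 2), ("cb", 3)])

def Spec_elimination (candidate : String) (election : List (String × Int)) (out : List (String × Int)) : Prop := out = elimination_alt candidate election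
instance (candidate : String) (election : List (String × Int)) (out : List (String × Int)) : Decidable (Spec_elimination candidate election out) := by unfold Spec_elimination; infer_instance

-- ===== CLAIM (what is proved, stated in full; the proofs are below) =====
def Claim_equal_elimination : Prop := ∀ (candidate : String) (election : List (String × Int)), Dom_elimination candidate election → Pre_elimination candidate election → Spec_elimination candidate election (elimination candidate election)

-- ===== LEMMAS AND PROOFS =====

-- A's branch (fresh-key insert vs +=) is exactly dict.modify with default 0
theorem step_eq_modify (d : PySem.Dict String Int) (k : String) (v : Int) :
    (if d.contains k then d.modify k 0 (· + v) else d.insert k v) = d.modify k 0 (· + v) := by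
  by_cases h : d.contains k = true
  · simp [h]
  · simp only [Bool.not_eq_true] at h
    simp [h, PySem.Dict.modify, PySem.Dict.getD_of_not_contains]

-- value invariant of the accumulation loop
theorem getD_foldl_modify_add {β : Type} (key : β → String) (val : β → Int)
    (l : List β) (d : PySem.Dict String Int) (k : String) :
    (l.foldl (fun d x => d.modify (key x) 0 (fun w => w + val x)) d).getD k 0
      = d.getD k 0 + ((l.filter (fun x => key x == k)).map val).sum := by
  induction l generalizing d with
  | nil => simp
  | cons a t ih =>
    simp only [List.foldl_cons, List.filter_cons, ih]
    by_cases h : key a = k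
    · subst h
      simp
      omega
    · have hb : (key a == k) = false := by simp [h]
      simp [hb, PySem.Dict.getD_modify]
      intro hh
      exact absurd hh.symm h

-- ===== VERDICT (by name: the statement is the Claim_ definition above) =====
theorem elimination_spec : Claim_equal_elimination := by
  intro candidate election _ _
  unfold Spec_elimination elimination elimination_alt
  have hbody : (fun (d : PySem.Dict String Int) (p : String × Int) =>
        let nb := stripCand candidate p.1
        if d.contains nb then d.modify nb 0 (· + p.2) else d.insert nb p.2)
      = (fun d p => d.modify (stripCand candidate p.1) 0 (fun w => w + p.2)) := by
    funext d p
    exact step_eq_modify d (stripCand candidate p.1) p.2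
  rw [hbody]
  have hnd : (election.foldl (fun d p => d.modify (stripCand candidate p.1) 0 (fun w => w + p.2)) PySem.Dict.empty).keys.Nodup := by
    exact PySem.Dict.nodup_keys_foldl_modify_key election (fun p => stripCand candidate p.1) 0
      (fun _ p => (fun w => w + p.2)) PySem.Dict.empty (by simp)
  rw [PySem.Dict.items_eq_map_keys _ hnd 0]
  rw [PySem.Dict.keys_foldl_modify_key election (fun p => stripCand candidate p.1) 0
      (fun _ p => (fun w => w + p.2)) PySem.Dict.empty]
  simp only [List.map_map, List.filter_map]
  apply List.map_congr_left
  intro b _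
  rw [getD_foldl_modify_add (fun p => stripCand candidate p.1) (fun p => p.2) election PySem.Dict.empty b]
  simp [Function.comp_def]
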